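-- pv_equiv track=rewrite | github.com/JimmyJamJr/nl-fine-tuning | nl/pre_pretrain/scripts/prepare_c4.py | pack_blocks
-- ===== SOURCE A (Python) =====
-- def pack_blocks(token_buffer: list, block_len: int, eos_token: int) -> list:
--     """Pack tokens into fixed-length blocks with EOS separators.
--
--     Uses block_len = seq_len + 1 so that we get seq_len tokens of prediction
--     (input = block[:-1], labels = block[1:]).
--     """
--     blocks = []
--     current_block = []
--
--     for tokens in token_buffer:
--         # Add tokens to current block
--         for tok in tokens:
--             current_block.append(tok)
--             if len(current_block) == block_len:
--                 blocks.append(current_block)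
--                 current_block = []
--         # Add EOS between documents
--         if current_block:
--             current_block.append(eos_token)
--             if len(current_block) == block_len:
--                 blocks.append(current_block)
--                 current_block = []
--
--     return blocks
-- ===== SOURCE B (Python) =====
-- def pack_blocks(token_buffer: list, block_len: int, eos_token: int) -> list:
--     """Pack tokens into fixed-length blocks with EOS separators.
--
--     Two-pass: first flatten everything into one stream (appending an EOS
--     after each document that does not end exactly on a block boundary),
--     then slice the stream into full blocks of block_len.
--     """
--     stream = []
--     for tokens in token_buffer:
--         stream.extend(tokens)
--         if len(stream) % block_len != 0:
--             stream.append(eos_token)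
--     full = len(stream) - len(stream) % block_len
--     return [stream[i:i + block_len] for i in range(0, full, block_len)]
-- ===== Notes on version B (the rewrite author's own statement) =====
-- stated objective: alternative
-- what changed: A packs blocks in one fused pass that appends token-by-token to a current block and flushes it whenever it reaches block_len; B first builds one flat token stream (appending EOS after each document that does not end on a block boundary, detected by len(stream) % block_len) and then slices the stream into full fixed-size chunks in a second pass.
-- outside the precondition, e.g. on pack_blocks([[1, 2]], 0, 9): A returns [], B raises ZeroDivisionError
import Mathlib
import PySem

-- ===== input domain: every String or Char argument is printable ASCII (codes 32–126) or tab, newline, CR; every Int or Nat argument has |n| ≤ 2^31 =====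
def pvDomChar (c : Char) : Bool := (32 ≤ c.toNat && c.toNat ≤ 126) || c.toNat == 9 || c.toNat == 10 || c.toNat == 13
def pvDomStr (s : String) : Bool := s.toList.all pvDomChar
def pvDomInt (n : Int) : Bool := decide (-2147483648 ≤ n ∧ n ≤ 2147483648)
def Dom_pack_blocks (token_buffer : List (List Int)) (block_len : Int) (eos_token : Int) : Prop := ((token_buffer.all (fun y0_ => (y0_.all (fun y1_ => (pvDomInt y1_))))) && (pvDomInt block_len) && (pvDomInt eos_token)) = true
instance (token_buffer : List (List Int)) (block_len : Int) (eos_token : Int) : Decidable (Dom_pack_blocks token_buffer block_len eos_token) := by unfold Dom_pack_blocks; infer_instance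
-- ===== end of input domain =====

-- B replaces A's fused accumulate-and-flush pass by a build-flat-stream-then-slice-into-chunks
-- two-pass shape (objective: alternative decomposition, same cost).

-- ===== PORT A =====
-- one token appended to the current block, flushing when it reaches block_len
def pvPackTok (block_len : Int) (st : List (List Int) × List Int) (tok : Int) :
    List (List Int) × List Int :=
  if ((st.2 ++ [tok]).length : Int) = block_len then (st.1 ++ [st.2 ++ [tok]], [])
  else (st.1, st.2 ++ [tok])

-- one document: append its tokens, then (if the current block is non-empty) the EOS token
def pvPackDoc (block_len eos_token : Int) (st : List (List Int) × List Int)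
    (tokens : List Int) : List (List Int) × List Int :=
  if (tokens.foldl (pvPackTok block_len) st).2 ≠ [] then
    pvPackTok block_len (tokens.foldl (pvPackTok block_len) st) eos_token
  else tokens.foldl (pvPackTok block_len) st

def pack_blocks (token_buffer : List (List Int)) (block_len : Int) (eos_token : Int) :
    List (List Int) :=
  (token_buffer.foldl (pvPackDoc block_len eos_token) ([], [])).1

-- ===== PORT B =====
-- first pass: extend the flat stream with the document, then EOS unless on a block boundary
def pvStreamStep (block_len eos_token : Int) (stream : List Int) (tokens : List Int) :
    List Int :=
  if PySem.Int.mod (((stream ++ tokens).length : Int)) block_len ≠ 0 then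
    stream ++ tokens ++ [eos_token]
  else stream ++ tokens

def pack_blocks_alt (token_buffer : List (List Int)) (block_len : Int) (eos_token : Int) :
    List (List Int) :=
  (PySem.List.pyRange 0
      (((token_buffer.foldl (pvStreamStep block_len eos_token) []).length : Int) -
        PySem.Int.mod ((token_buffer.foldl (pvStreamStep block_len eos_token) []).length : Int)
          block_len) block_len).map
    (fun i => PySem.List.slice (token_buffer.foldl (pvStreamStep block_len eos_token) [])
      (some i) (some (i + block_len)))

-- ===== PRECONDITION & SPEC =====
-- Pre_ excludes only block_len = 0, where A's flush test never fires so it silently returns [],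
-- while B's modulo-based chunker raises ZeroDivisionError.
def Pre_pack_blocks (token_buffer : List (List Int)) (block_len : Int) (eos_token : Int) : Prop :=
  block_len ≠ 0
instance (token_buffer : List (List Int)) (block_len : Int) (eos_token : Int) :
    Decidable (Pre_pack_blocks token_buffer block_len eos_token) := by
  unfold Pre_pack_blocks; infer_instance

def pvWitness_pack_blocks : List (List Int) × Int × Int := ([[1, 2, 3]], 2, 9)

def Spec_pack_blocks (token_buffer : List (List Int)) (block_len : Int) (eos_token : Int) (out : List (List Int)) : Prop := out = pack_blocks_alt token_buffer block_len eos_token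
instance (token_buffer : List (List Int)) (block_len : Int) (eos_token : Int) (out : List (List Int)) : Decidable (Spec_pack_blocks token_buffer block_len eos_token out) := by unfold Spec_pack_blocks; infer_instance

-- ===== CLAIM (what is proved, stated in full; the proofs are below) =====
def Claim_equal_pack_blocks : Prop := ∀ (token_buffer : List (List Int)) (block_len : Int) (eos_token : Int), Dom_pack_blocks token_buffer block_len eos_token → Pre_pack_blocks token_buffer block_len eos_token → Spec_pack_blocks token_buffer block_len eos_token (pack_blocks token_buffer block_len eos_token)

-- ===== LEMMAS AND PROOFS =====

-- the state invariant maintained by A's pass (k = block_len as a Nat)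
def pvInv (k : Nat) (st : List (List Int) × List Int) : Prop :=
  (∀ b ∈ st.1, b.length = k) ∧ st.2.length < k

lemma pvFlatten_length (k : Nat) (blocks : List (List Int))
    (hb : ∀ b ∈ blocks, b.length = k) : blocks.flatten.length = blocks.length * k := by
  induction blocks with
  | nil => simp
  | cons b bs ih =>
    simp only [List.flatten_cons, List.length_append, List.length_cons]
    rw [hb b (by simp), ih (fun x hx => hb x (by simp [hx]))]
    ring

-- A's inner token loop: invariant preserved, and flatten++cur tracks the flat stream
lemma pvTokLoop (bl : Int) (k : Nat) (hk : 0 < k) (hbl : (k : Int) = bl) :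
    ∀ (tokens : List Int) (st : List (List Int) × List Int), pvInv k st →
      pvInv k (tokens.foldl (pvPackTok bl) st) ∧
      (tokens.foldl (pvPackTok bl) st).1.flatten ++ (tokens.foldl (pvPackTok bl) st).2 =
        st.1.flatten ++ st.2 ++ tokens := by
  intro tokens
  induction tokens with
  | nil => intro st h; simpa using h
  | cons t ts ih =>
    intro st h
    have hstep : pvInv k (pvPackTok bl st t) ∧
        (pvPackTok bl st t).1.flatten ++ (pvPackTok bl st t).2 =
          st.1.flatten ++ st.2 ++ [t] := by
      unfold pvPackTok pvInv
      by_cases hcond : ((st.2 ++ [t]).length : Int) = bl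
      · rw [if_pos hcond]
        constructor
        · exact ⟨fun b hb => by
            rcases List.mem_append.mp hb with h1 | h1
            · exact h.1 b h1
            · have : b = st.2 ++ [t] := by simpa using h1
              subst this
              have : ((st.2 ++ [t]).length : Int) = (k : Int) := by rw [hcond, hbl]
              exact_mod_cast this, hk⟩
        · simp
      · rw [if_neg hcond]
        refine ⟨⟨h.1, ?_⟩, by simp⟩
        have hneq : (st.2 ++ [t]).length ≠ k := fun hc => hcond (by rw [hc]; exact hbl)
        have hlt := h.2
        show (st.2 ++ [t]).length < k
        simp only [List.length_append, List.length_singleton] at hneq ⊢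
        omega
    have := ih (pvPackTok bl st t) hstep.1
    simp only [List.foldl_cons]
    exact ⟨this.1, by rw [this.2, hstep.2]; simp⟩

-- A's document loop versus B's stream-building loop
lemma pvDocLoop (bl eos : Int) (k : Nat) (hk : 0 < k) (hbl : (k : Int) = bl) :
    ∀ (tb : List (List Int)) (st : List (List Int) × List Int), pvInv k st →
      pvInv k (tb.foldl (pvPackDoc bl eos) st) ∧
      (tb.foldl (pvPackDoc bl eos) st).1.flatten ++ (tb.foldl (pvPackDoc bl eos) st).2 =
        tb.foldl (pvStreamStep bl eos) (st.1.flatten ++ st.2) := by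
  intro tb
  induction tb with
  | nil => intro st h; simpa using h
  | cons tokens ds ih =>
    intro st h
    obtain ⟨h1, h2⟩ := pvTokLoop bl k hk hbl tokens st h
    set st1 := tokens.foldl (pvPackTok bl) st with hst1
    -- the flat stream after appending this document's tokens
    have hmod : PySem.Int.mod (((st.1.flatten ++ st.2 ++ tokens).length : Int)) bl =
        (st1.2.length : Int) := by
      rw [← h2, ← hbl]
      have : (st1.1.flatten ++ st1.2).length = st1.1.length * k + st1.2.length := by
        simp [pvFlatten_length k st1.1 h1.1]
      rw [this]
      rw [PySem.Int.mod_natCast]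
      congr 1
      rw [Nat.mul_add_mod', Nat.mod_eq_of_lt h1.2]
    have hstep : pvInv k (pvPackDoc bl eos st tokens) ∧
        (pvPackDoc bl eos st tokens).1.flatten ++ (pvPackDoc bl eos st tokens).2 =
          pvStreamStep bl eos (st.1.flatten ++ st.2) tokens := by
      unfold pvPackDoc pvStreamStep
      rw [← hst1]
      by_cases hcur : st1.2 = []
      · rw [if_neg (by simp [hcur]),
          if_neg (by rw [hmod, hcur]; simp)]
        exact ⟨h1, h2⟩
      · rw [if_pos hcur, if_pos (by rw [hmod]; exact_mod_cast (by simpa using hcur :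
          st1.2.length ≠ 0))]
        unfold pvPackTok
        by_cases hcond : ((st1.2 ++ [eos]).length : Int) = bl
        · rw [if_pos hcond]
          refine ⟨⟨fun b hb => ?_, hk⟩, ?_⟩
          · rcases List.mem_append.mp hb with hm | hm
            · exact h1.1 b hm
            · have : b = st1.2 ++ [eos] := by simpa using hm
              subst this
              have : ((st1.2 ++ [eos]).length : Int) = (k : Int) := by rw [hcond, hbl]
              exact_mod_cast this
          · rw [← h2]; simp
        · rw [if_neg hcond]
          refine ⟨⟨h1.1, ?_⟩, ?_⟩
          · have hneq : (st1.2 ++ [eos]).length ≠ k := fun hc => hcond (by rw [hc]; exact hbl)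
            have hlt := h1.2
            show (st1.2 ++ [eos]).length < k
            simp only [List.length_append, List.length_singleton] at hneq ⊢
            omega
          · rw [← h2]; simp
    have := ih (pvPackDoc bl eos st tokens) hstep.1
    simp only [List.foldl_cons]
    exact ⟨this.1, by rw [this.2, hstep.2]⟩

-- slicing the flat stream at multiples of k recovers exactly the full blocks
lemma pvChunkGet (k : Nat) :
    ∀ (blocks : List (List Int)) (cur : List Int), (∀ b ∈ blocks, b.length = k) →
      ∀ j (hj : j < blocks.length),
        (((blocks.flatten ++ cur).drop (j * k)).take k) = blocks[j] := by
  intro blocks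
  induction blocks with
  | nil => intro cur _ j hj; simp at hj
  | cons b bs ih =>
    intro cur hb j hj
    have hbk : b.length = k := hb b (by simp)
    cases j with
    | zero =>
      simp only [Nat.zero_mul, List.drop_zero, List.flatten_cons, List.getElem_cons_zero]
      rw [List.append_assoc, ← hbk, List.take_left]
    | succ j =>
      have : (j + 1) * k = b.length + j * k := by rw [hbk]; ring
      simp only [List.flatten_cons, List.append_assoc, this, List.getElem_cons_succ]
      rw [List.drop_append, List.drop_of_length_le (by omega), List.nil_append,
        show b.length + j * k - b.length = j * k by omega]
      exact ih cur (fun x hx => hb x (by simp [hx])) j (by simpa using hj)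

lemma pvRange_mul (k : Nat) (hk : 0 < k) (m : Nat) :
    PySem.List.pyRange 0 ((m * k : Nat) : Int) (k : Int) =
      (List.range m).map (fun j => ((j * k : Nat) : Int)) := by
  rw [PySem.List.pyRange_of_pos 0 ((m * k : Nat) : Int) (by exact_mod_cast hk)]
  have hcount : (if (0 : Int) < ((m * k : Nat) : Int) then
      ((((m * k : Nat) : Int) - 0 + (k : Int) - 1) / (k : Int)).toNat else 0) = m := by
    by_cases hm : m = 0
    · simp [hm]
    · rw [if_pos (by positivity)]
      rw [show (((m * k : Nat) : Int) - 0 + (k : Int) - 1) = ((m * k + (k - 1) : Nat) : Int)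
        by omega]
      rw [show ((m * k + (k - 1) : Nat) : Int) / ((k : Nat) : Int) =
        (((m * k + (k - 1)) / k : Nat) : Int) by push_cast; ring]
      rw [Int.toNat_natCast]
      rw [Nat.mul_comm m k, Nat.mul_add_div hk, Nat.div_eq_of_lt (by omega)]
      rfl
  rw [hcount]
  apply List.map_congr_left
  intro j _
  push_cast; ring

lemma pvChunk (k : Nat) (hk : 0 < k) (blocks : List (List Int)) (cur : List Int)
    (hb : ∀ b ∈ blocks, b.length = k) (hc : cur.length < k) :
    (PySem.List.pyRange 0
        (((blocks.flatten ++ cur).length : Int) -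
          PySem.Int.mod ((blocks.flatten ++ cur).length : Int) (k : Int)) (k : Int)).map
      (fun i => PySem.List.slice (blocks.flatten ++ cur) (some i) (some (i + (k : Int)))) =
      blocks := by
  have hlen : (blocks.flatten ++ cur).length = blocks.length * k + cur.length := by
    simp [pvFlatten_length k blocks hb]
  have hmod : PySem.Int.mod ((blocks.flatten ++ cur).length : Int) (k : Int) =
      (cur.length : Int) := by
    rw [hlen]
    rw [PySem.Int.mod_natCast]
    congr 1
    rw [Nat.mul_add_mod']
    exact Nat.mod_eq_of_lt hc
  have hfull : ((blocks.flatten ++ cur).length : Int) -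
      PySem.Int.mod ((blocks.flatten ++ cur).length : Int) (k : Int) =
      ((blocks.length * k : Nat) : Int) := by
    rw [hmod, hlen]; push_cast; ring
  rw [hfull, pvRange_mul k hk blocks.length, List.map_map]
  apply List.ext_getElem (by simp)
  intro j hj _
  simp only [List.getElem_map, List.getElem_range, Function.comp_apply]
  rw [show ((j * k : Nat) : Int) + ((k : Nat) : Int) = ((j * k : Nat) : Int) + ((k : Nat) : Int)
    from rfl]
  rw [PySem.List.slice_natCast_add]
  exact pvChunkGet k blocks cur hb j (by simpa using hj)

-- negative block_len: A never flushes a block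
lemma pvNegTok (bl : Int) (hbl : bl < 0) (st : List (List Int) × List Int) (t : Int) :
    (pvPackTok bl st t).1 = st.1 := by
  unfold pvPackTok
  rw [if_neg (by simp only [List.length_append, List.length_singleton]; omega)]

lemma pvNegTokLoop (bl : Int) (hbl : bl < 0) :
    ∀ (tokens : List Int) (st : List (List Int) × List Int),
      (tokens.foldl (pvPackTok bl) st).1 = st.1 := by
  intro tokens
  induction tokens with
  | nil => intro st; rfl
  | cons t ts ih => intro st; rw [List.foldl_cons, ih, pvNegTok bl hbl]

lemma pvNegDocLoop (bl eos : Int) (hbl : bl < 0) :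
    ∀ (tb : List (List Int)) (st : List (List Int) × List Int),
      (tb.foldl (pvPackDoc bl eos) st).1 = st.1 := by
  intro tb
  induction tb with
  | nil => intro st; rfl
  | cons tokens ds ih =>
    intro st
    rw [List.foldl_cons, ih]
    unfold pvPackDoc
    split
    · rw [pvNegTok bl hbl, pvNegTokLoop bl hbl]
    · rw [pvNegTokLoop bl hbl]

lemma pvNegRange (bl : Int) (hbl : bl < 0) (n : Int) (hn : 0 ≤ n) :
    PySem.List.pyRange 0 n bl = [] := by
  unfold PySem.List.pyRange
  rw [if_neg (by omega)]
  simp only [if_neg (by omega : ¬ (0 : Int) < bl), if_neg (by omega : ¬ n < 0)]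
  simp

-- ===== VERDICT (by name: the statement is the Claim_ definition above) =====
theorem pack_blocks_spec : Claim_equal_pack_blocks := by
  intro tb bl eos _ hpre
  unfold Spec_pack_blocks pack_blocks pack_blocks_alt
  rcases lt_trichotomy bl 0 with hneg | hz | hpos
  · -- negative block_len: both sides are []
    rw [pvNegDocLoop bl eos hneg]
    have hmn := (PySem.Int.mod_neg_bounds
      (a := ((tb.foldl (pvStreamStep bl eos) []).length : Int)) hneg).2
    rw [pvNegRange bl hneg _ (by omega)]
    simp
  · exact absurd hz hpre
  · -- positive block_len
    have hk : (bl.toNat : Int) = bl := Int.toNat_of_nonneg (by omega)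
    have hkpos : 0 < bl.toNat := by omega
    obtain ⟨hinv, hstream⟩ := pvDocLoop bl eos bl.toNat hkpos hk tb ([], [])
      ⟨by simp, hkpos⟩
    have hstream' : (tb.foldl (pvPackDoc bl eos) ([], [])).1.flatten ++
        (tb.foldl (pvPackDoc bl eos) ([], [])).2 =
        List.foldl (pvStreamStep bl eos) [] tb := hstream
    have hch := pvChunk bl.toNat hkpos (tb.foldl (pvPackDoc bl eos) ([], [])).1
      (tb.foldl (pvPackDoc bl eos) ([], [])).2 hinv.1 hinv.2
    rw [hk, hstream'] at hch
    exact hch.symm
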